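-- pv_equiv track=rewrite | github.com/trevinatan/Pinterest-Engage-2019 | FormattedNames.py | level3_2
-- ===== SOURCE A (Python) =====
-- def level1(lst):
-- 	if lst is None or len(lst) == 0:
-- 		return None
-- 	if len(lst) == 1:
-- 		return lst[0]
-- 	res = ""
-- 	i = 0
-- 	while i < len(lst) - 1:
-- 		res += lst[i] + ", "
-- 		i += 1
-- 	res += "and " + lst[len(lst) - 1]
-- 	return res
--
-- def level3_2(lst, max_chars):
-- 	"""Same function but doesn't call level2 function"""
-- 	if lst is None or len(lst) == 0:
-- 		return None
-- 	i = 0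
-- 	k = 0
-- 	res = ""
-- 	while i < len(lst):
-- 		if max_chars - len(lst[i]) >= 0:
-- 			if i == len(lst) - 1:
-- 				return level1(lst)
-- 			else:
-- 				res += lst[i] + ", "
-- 				max_chars -= len(lst[i])
-- 				k += 1
-- 				i += 1
-- 		else:
-- 			break
-- 	return res + "and " + str(len(lst) - k) + " more"
-- ===== SOURCE B (Python) =====
-- def level3_2(lst, max_chars):
--     if lst is None or len(lst) == 0:
--         return None
--     sums = []
--     t = 0
--     for x in lst:
--         t += len(x)
--         sums.append(t)
--     k = sum(1 for s in sums if s <= max_chars)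
--     if k == len(lst):
--         if len(lst) == 1:
--             return lst[0]
--         return ", ".join(lst[:-1]) + ", and " + lst[-1]
--     return "".join(x + ", " for x in lst[:k]) + "and " + str(len(lst) - k) + " more"
-- ===== Notes on version B (the rewrite author's own statement) =====
-- stated objective: faster
-- what changed: Replaces A's budget-decrementing while loop that grows the result by repeated string += by a two-phase computation: build the cumulative-length table once, count how many prefix sums fit the budget, then shape the whole output from that cutoff with single join calls.
import Mathlib
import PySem

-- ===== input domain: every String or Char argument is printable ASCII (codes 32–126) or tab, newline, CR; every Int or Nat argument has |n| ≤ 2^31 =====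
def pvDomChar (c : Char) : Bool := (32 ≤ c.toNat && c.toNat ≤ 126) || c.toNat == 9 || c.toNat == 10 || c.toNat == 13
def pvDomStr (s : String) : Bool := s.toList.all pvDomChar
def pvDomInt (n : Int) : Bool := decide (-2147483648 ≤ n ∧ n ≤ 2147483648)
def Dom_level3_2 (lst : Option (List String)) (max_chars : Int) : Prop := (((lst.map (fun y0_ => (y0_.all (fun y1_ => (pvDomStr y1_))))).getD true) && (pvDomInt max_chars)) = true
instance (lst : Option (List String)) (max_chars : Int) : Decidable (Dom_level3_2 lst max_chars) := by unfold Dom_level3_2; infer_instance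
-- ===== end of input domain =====

-- B re-decomposes A's budget-decrementing while loop (repeated string +=) into a prefix-sum table + count + single joins; objective: faster (measured).

-- ===== PORT A =====
-- while i < len(lst) - 1: res += lst[i] + ", "
def level1Loop (lst : List String) (i : Nat) (res : String) : String :=
  if i < lst.length - 1 then
    level1Loop lst (i + 1) (res ++ lst.getD i "" ++ ", ")
  else res
termination_by lst.length - 1 - i

def level1 (lst : List String) : Option String :=
  if lst.length = 0 then none
  else if lst.length = 1 then some (lst.getD 0 "")
  else some (level1Loop lst 0 "" ++ "and " ++ lst.getD (lst.length - 1) "")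

-- the while loop of level3_2 (state: i, k, res, the decremented max_chars)
def level3Loop (lst : List String) (i : Nat) (k : Nat) (res : String) (mc : Int) : Option String :=
  if i < lst.length then
    if 0 ≤ mc - PySem.Str.len (lst.getD i "") then
      if i = lst.length - 1 then level1 lst
      else level3Loop lst (i + 1) (k + 1) (res ++ lst.getD i "" ++ ", ")
             (mc - PySem.Str.len (lst.getD i ""))
    else some (res ++ "and " ++ PySem.Int.toStr ((lst.length : Int) - (k : Int)) ++ " more")
  else some (res ++ "and " ++ PySem.Int.toStr ((lst.length : Int) - (k : Int)) ++ " more")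
termination_by lst.length - i

def level3_2 (lst : Option (List String)) (max_chars : Int) : Option String :=
  match lst with
  | none => none
  | some l => if l.length = 0 then none else level3Loop l 0 0 "" max_chars

-- ===== PORT B =====
-- cumulative length table (the for-loop building `sums`)
def prefixSums (l : List String) : List Int :=
  (l.foldl (fun (st : Int × List Int) x =>
      (st.1 + PySem.Str.len x, st.2 ++ [st.1 + PySem.Str.len x])) (0, [])).2

def level3_2_alt (lst : Option (List String)) (max_chars : Int) : Option String :=
  match lst with
  | none => none
  | some l =>
    if l.length = 0 then none
    else
      let sums := prefixSums l
      let k := sums.countP (fun s => decide (s ≤ max_chars))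
      if k = l.length then
        if l.length = 1 then some (l.getD 0 "")
        else some (PySem.Str.join ", " l.dropLast ++ ", and " ++ l.getD (l.length - 1) "")
      else some (PySem.Str.join "" ((l.take k).map (fun x => x ++ ", ")) ++ "and "
                 ++ PySem.Int.toStr ((l.length : Int) - (k : Int)) ++ " more")

-- ===== PRECONDITION & SPEC =====
def Spec_level3_2 (lst : Option (List String)) (max_chars : Int) (out : Option String) : Prop := out = level3_2_alt lst max_chars
instance (lst : Option (List String)) (max_chars : Int) (out : Option String) : Decidable (Spec_level3_2 lst max_chars out) := by unfold Spec_level3_2; infer_instance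

-- ===== CLAIM (what is proved, stated in full; the proofs are below) =====
def Claim_equal_level3_2 : Prop := ∀ (lst : Option (List String)) (max_chars : Int), Dom_level3_2 lst max_chars → Spec_level3_2 lst max_chars (level3_2 lst max_chars)

-- ===== LEMMAS AND PROOFS =====

-- break point of A's loop: how many consecutive names fit the (decremented) budget
def brk (mc : Int) : List String → Nat
  | [] => 0
  | x :: xs => if 0 ≤ mc - PySem.Str.len x then brk (mc - PySem.Str.len x) xs + 1 else 0

-- "x0, x1, ... , " — every element followed by ", "
def pieces : List String → String
  | [] => ""
  | x :: xs => x ++ ", " ++ pieces xs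

-- recursive form of the prefix-sum table, with running total t
def sumsAux (t : Int) : List String → List Int
  | [] => []
  | x :: xs => (t + PySem.Str.len x) :: sumsAux (t + PySem.Str.len x) xs

theorem foldl_sums (l : List String) (t : Int) (acc : List Int) :
    (l.foldl (fun (st : Int × List Int) x =>
      (st.1 + PySem.Str.len x, st.2 ++ [st.1 + PySem.Str.len x])) (t, acc)).2
    = acc ++ sumsAux t l := by
  induction l generalizing t acc with
  | nil => simp [sumsAux]
  | cons x xs ih =>
    rw [List.foldl_cons, sumsAux, ih]
    simp

theorem le_of_mem_sumsAux (t : Int) (l : List String) (s : Int) (h : s ∈ sumsAux t l) : t ≤ s := by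
  induction l generalizing t with
  | nil => simp [sumsAux] at h
  | cons x xs ih =>
    have hx : (0:Int) ≤ PySem.Str.len x := by simp [PySem.Str.len_eq]
    simp only [sumsAux, List.mem_cons] at h
    rcases h with h | h
    · omega
    · have := ih (t + PySem.Str.len x) h; omega

theorem countP_sumsAux (mc : Int) (l : List String) (t : Int) :
    (sumsAux t l).countP (fun s => decide (s ≤ mc)) = brk (mc - t) l := by
  induction l generalizing t with
  | nil => simp [sumsAux, brk]
  | cons x xs ih =>
    simp only [sumsAux, brk, List.countP_cons]
    by_cases h : t + PySem.Str.len x ≤ mc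
    · have h' : 0 ≤ mc - t - PySem.Str.len x := by omega
      rw [if_pos h', if_pos (by simpa using h), ih (t + PySem.Str.len x)]
      have e : mc - (t + PySem.Str.len x) = mc - t - PySem.Str.len x := by ring
      rw [e]
    · have h' : ¬ (0 ≤ mc - t - PySem.Str.len x) := by omega
      have hz : (sumsAux (t + PySem.Str.len x) xs).countP (fun s => decide (s ≤ mc)) = 0 := by
        rw [List.countP_eq_zero]
        intro s hs
        have := le_of_mem_sumsAux _ _ _ hs
        simp only [decide_eq_true_eq]
        omega
      rw [if_neg h', if_neg (by simpa using h), hz]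

theorem getD_of_drop (l : List String) (i : Nat) (x : String) (xs : List String)
    (h : l.drop i = x :: xs) : l.getD i "" = x := by
  have h0 : l[i]? = some x := by
    have h1 : (l.drop i)[0]? = some x := by rw [h]; rfl
    rw [List.getElem?_drop] at h1
    simpa using h1
  simp [List.getD_eq_getElem?_getD, h0]

theorem drop_succ_of_drop (l : List String) (i : Nat) (x : String) (xs : List String)
    (h : l.drop i = x :: xs) : l.drop (i+1) = xs := by
  rw [← List.drop_drop, h]; rfl

theorem len_of_drop (l : List String) (i : Nat) (x : String) (xs : List String)
    (h : l.drop i = x :: xs) : l.length - i = xs.length + 1 := by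
  have := congrArg List.length h
  simpa using this

-- characterization of A's main loop (with k = i, as in the program)
theorem level3Loop_char (l : List String) (d : List String) (i : Nat) (res : String) (mc : Int)
    (hd : l.drop i = d) (hi : i < l.length) :
    level3Loop l i i res mc =
      if brk mc d = d.length then level1 l
      else some (res ++ pieces (d.take (brk mc d)) ++ "and "
                 ++ PySem.Int.toStr ((l.length : Int) - ((i + brk mc d : Nat) : Int)) ++ " more") := by
  induction d generalizing i res mc with
  | nil =>
    exfalso
    have := congrArg List.length hd
    simp at this
    omega
  | cons x xs ih =>
    have hx : l.getD i "" = x := getD_of_drop l i x xs hd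
    have hlen : l.length - i = xs.length + 1 := len_of_drop l i x xs hd
    rw [level3Loop, if_pos hi, hx]
    by_cases hfit : 0 ≤ mc - PySem.Str.len x
    · rw [if_pos hfit]
      have hb : brk mc (x :: xs) = brk (mc - PySem.Str.len x) xs + 1 := by
        rw [brk, if_pos hfit]
      by_cases hlast : i = l.length - 1
      · rw [if_pos hlast]
        have hxs : xs = [] := List.length_eq_zero_iff.mp (by omega)
        subst hxs
        rw [hb]
        simp [brk]
      · rw [if_neg hlast]
        have hxs : xs.length ≠ 0 := by omega
        have hi' : i + 1 < l.length := by omega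
        have hd' : l.drop (i+1) = xs := drop_succ_of_drop l i x xs hd
        rw [ih (i+1) (res ++ x ++ ", ") (mc - PySem.Str.len x) hd' hi', hb]
        by_cases hall : brk (mc - PySem.Str.len x) xs = xs.length
        · rw [if_pos hall, if_pos (by rw [List.length_cons]; omega)]
        · rw [if_neg hall, if_neg (by rw [List.length_cons]; omega)]
          rw [show (i+1) + brk (mc - PySem.Str.len x) xs
                = i + (brk (mc - PySem.Str.len x) xs + 1) by omega]
          simp only [List.take_succ_cons, pieces, String.append_assoc]
    · rw [if_neg hfit]
      have hb0 : brk mc (x :: xs) = 0 := by rw [brk, if_neg hfit]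
      rw [hb0, if_neg (by simp)]
      simp only [List.take_zero, pieces, String.append_empty, Nat.add_zero]

-- level1's loop builds exactly `pieces` of all but the last element
theorem level1Loop_char (l : List String) (d : List String) (i : Nat) (res : String)
    (hd : l.drop i = d) :
    level1Loop l i res = res ++ pieces d.dropLast := by
  induction d generalizing i res with
  | nil =>
    have hle : l.length ≤ i := by
      have := congrArg List.length hd; simp at this; omega
    rw [level1Loop, if_neg (by omega)]
    simp [pieces]
  | cons x xs ih =>
    have hx : l.getD i "" = x := getD_of_drop l i x xs hd
    have hlen : l.length - i = xs.length + 1 := len_of_drop l i x xs hd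
    have hi : i < l.length := by omega
    cases xs with
    | nil =>
      rw [level1Loop, if_neg (by simp at hlen; omega)]
      simp [pieces]
    | cons y ys =>
      have hd' : l.drop (i+1) = y :: ys := drop_succ_of_drop l i x (y :: ys) hd
      have hlen' : l.length - i = ys.length + 2 := by simpa using hlen
      rw [level1Loop, if_pos (by omega), hx, ih (i+1) _ hd']
      simp [pieces, String.append_assoc]

theorem join_cons_cons (sep x y : String) (t : List String) :
    PySem.Str.join sep (x :: y :: t) = x ++ sep ++ PySem.Str.join sep (y :: t) := by
  simp [PySem.Str.join, PySem.Chars.join_cons_cons, String.append_assoc]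

theorem pieces_eq_join (xs : List String) (h : xs ≠ []) :
    pieces xs = PySem.Str.join ", " xs ++ ", " := by
  induction xs with
  | nil => exact absurd rfl h
  | cons x t ih =>
    cases t with
    | nil => simp [pieces, PySem.Str.join]
    | cons y ys =>
      rw [pieces, ih (by simp), join_cons_cons]
      simp [String.append_assoc]

theorem join_empty_map (xs : List String) :
    PySem.Str.join "" (xs.map (fun x => x ++ ", ")) = pieces xs := by
  induction xs with
  | nil => simp [pieces, PySem.Str.join]
  | cons x t ih =>
    cases t with
    | nil => simp [pieces, PySem.Str.join, String.append_empty]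
    | cons y ys =>
      rw [List.map_cons, List.map_cons, join_cons_cons]
      rw [List.map_cons] at ih
      rw [ih]
      simp [pieces, String.append_empty, String.append_assoc]

-- ===== VERDICT (by name: the statement is the Claim_ definition above) =====
theorem level3_2_spec : Claim_equal_level3_2 := by
  intro lst max_chars _
  unfold Spec_level3_2
  match lst with
  | none => rfl
  | some l =>
    by_cases hnil : l.length = 0
    · simp [level3_2, level3_2_alt, hnil]
    · have hlpos : 0 < l.length := Nat.pos_of_ne_zero hnil
      have hk : (prefixSums l).countP (fun s => decide (s ≤ max_chars)) = brk max_chars l := by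
        rw [prefixSums, foldl_sums]
        simpa using countP_sumsAux max_chars l 0
      simp only [level3_2, level3_2_alt, if_neg hnil, hk]
      rw [level3Loop_char l l 0 "" max_chars (by simp) hlpos]
      by_cases hall : brk max_chars l = l.length
      · rw [if_pos hall, if_pos hall]
        rw [level1, if_neg hnil]
        by_cases h1 : l.length = 1
        · rw [if_pos h1, if_pos h1]
        · rw [if_neg h1, if_neg h1]
          have hdl : l.dropLast ≠ [] := by
            intro hh
            have := congrArg List.length hh
            simp at this
            omega
          rw [level1Loop_char l l 0 "" (by simp), pieces_eq_join _ hdl]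
          simp [String.append_assoc]
      · rw [if_neg hall, if_neg hall, join_empty_map]
        simp only [String.empty_append, Nat.zero_add]
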